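-- pv_equiv track=rewrite | github.com/twtseng/Dojo_Assignments | CodingPractice/pythontest.py | staircase_steps
-- ===== SOURCE A (Python) =====
-- def staircase_steps(n, steps):
--     matches = []
--     def recurse_steps(n, steps, step_list):
--         for step in steps:
--             new = step_list[:]
--             new.append(step)
--             if sum(new) == n:
--                 matches.append(new)
--             elif sum(new) < n:
--                 recurse_steps(n, steps, new)
--     recurse_steps(n, steps, [])
--     return matches
-- ===== SOURCE B (Python) =====
-- def staircase_steps(n, steps):
--     # Memoized top-down DP on the remaining target instead of A's prefix-accumulating DFS.
--     if n <= 0: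
--         return []
--     memo = {0: [[]]}
--     def build(t):
--         if t in memo:
--             return memo[t]
--         res = []
--         for s in steps:
--             if s <= t:
--                 res += [[s] + c for c in build(t - s)]
--         memo[t] = res
--         return res
--     return build(n)
-- ===== Notes on version B (the rewrite author's own statement) =====
-- stated objective: alternative
-- what changed: Replaced A's prefix-accumulating DFS with a shared matches list and sum() recomputed at every node by a memoized top-down tabulation on the remaining target that builds each composition list by prepending the step to the cached sub-compositions.
-- outside the precondition, e.g. on staircase_steps(0, [0]): A returns [[0]], B returns []; on staircase_steps(-1, [-1]): A returns [[-1]], B returns []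
import Mathlib
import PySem

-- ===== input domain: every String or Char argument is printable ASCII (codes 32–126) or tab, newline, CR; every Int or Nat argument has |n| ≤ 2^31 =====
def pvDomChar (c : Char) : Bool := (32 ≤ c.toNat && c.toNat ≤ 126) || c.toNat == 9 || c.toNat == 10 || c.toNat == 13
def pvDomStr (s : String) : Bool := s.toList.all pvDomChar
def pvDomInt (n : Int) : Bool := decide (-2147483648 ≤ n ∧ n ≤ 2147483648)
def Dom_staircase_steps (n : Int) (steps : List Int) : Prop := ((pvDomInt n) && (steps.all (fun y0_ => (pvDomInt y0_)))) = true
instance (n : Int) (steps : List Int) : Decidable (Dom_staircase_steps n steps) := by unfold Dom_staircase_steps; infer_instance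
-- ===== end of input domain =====

-- B replaces A's prefix-accumulating DFS by a memoized top-down tabulation on the
-- remaining target (objective: alternative decomposition, not claimed faster).

-- ===== PORT A =====
-- A's inner recursion: steps is iterated, `new` is the extended prefix; matches is the
-- accumulator threaded through.  The `fuel` argument is a totality guard only: inside
-- Pre_ (all steps positive) the recursion depth is < n, so fuel = n.toNat + 1 is never
-- exhausted; Python A has no such bound (it diverges on non-positive steps, outside Pre_).
def recA (fuel : Nat) (n : Int) (steps : List Int) (stepList : List Int)
    (matched : List (List Int)) : List (List Int) :=
  match fuel with
  | 0 => matched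
  | f + 1 =>
    steps.foldl (fun m step =>
      let nw := stepList ++ [step]
      if nw.sum = n then m ++ [nw]
      else if nw.sum < n then recA f n steps nw m
      else m) matched

def staircase_steps (n : Int) (steps : List Int) : List (List Int) :=
  recA (n.toNat + 1) n steps [] []

-- ===== PORT B =====
-- Source B's build(t): t = 0 is the memo base case {0: [[]]}; otherwise fold over steps,
-- appending [s] + c for each composition c of t - s.  The memo dict of Source B is a pure
-- cache of these same values and is dropped here; the `0 < s` conjunct is a totality
-- guard only (inside Pre_ every step is positive, and Source B diverges when a step ≤ 0
-- is ≤ t, outside Pre_).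
def buildB (steps : List Int) (t : Nat) : List (List Int) :=
  if h : t = 0 then [[]]
  else
    steps.foldl (fun res s =>
      if hs : 0 < s ∧ s ≤ (t : Int) then
        res ++ (buildB steps (t - s.toNat)).map (fun c => s :: c)
      else res) []
decreasing_by
  have h1 : 1 ≤ s.toNat := by omega
  omega

def staircase_steps_alt (n : Int) (steps : List Int) : List (List Int) :=
  if n ≤ 0 then [] else buildB steps n.toNat

-- ===== PRECONDITION & SPEC =====
-- Pre_ restricts to the natural domain of the task: positive step sizes.  With a
-- non-positive step A diverges whenever the recursion fires (e.g. n=1, steps=[0]);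
-- on the remaining degenerate inputs with non-positive steps A's returned value
-- (e.g. [[0]] for n=0, steps=[0]) is an artefact outside the task's natural domain
-- and B naturally returns [] there (see claim cites).
def Pre_staircase_steps (n : Int) (steps : List Int) : Prop := ∀ s ∈ steps, 0 < s
instance (n : Int) (steps : List Int) : Decidable (Pre_staircase_steps n steps) := by
  unfold Pre_staircase_steps; infer_instance

def pvWitness_staircase_steps : Int × List Int := (4, [1, 2])

def Spec_staircase_steps (n : Int) (steps : List Int) (out : List (List Int)) : Prop :=
  out = staircase_steps_alt n steps
instance (n : Int) (steps : List Int) (out : List (List Int)) :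
    Decidable (Spec_staircase_steps n steps out) := by
  unfold Spec_staircase_steps; infer_instance

-- ===== CLAIM (what is proved, stated in full; the proofs are below) =====
def Claim_equal_staircase_steps : Prop :=
  ∀ (n : Int) (steps : List Int), Dom_staircase_steps n steps →
    Pre_staircase_steps n steps → Spec_staircase_steps n steps (staircase_steps n steps)

-- ===== LEMMAS AND PROOFS =====

-- Main correspondence: with all fold-listed steps positive, A's recursion from prefix
-- `pre` with remaining target t = n - pre.sum ≥ 1 appends exactly pre ++ c for the
-- compositions c of t produced by buildB, in the same order.
theorem recA_eq_buildB (steps : List Int) (hpos : ∀ s ∈ steps, 0 < s) (n : Int) :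
    ∀ t : Nat, ∀ fuel pre acc, 1 ≤ t → pre.sum + (t : Int) = n → t ≤ fuel →
      recA fuel n steps pre acc = acc ++ (buildB steps t).map (fun c => pre ++ c) := by
  intro t
  induction t using Nat.strong_induction_on with
  | _ t ih =>
    intro fuel pre acc ht hsum hfuel
    obtain ⟨f, rfl⟩ : ∃ f, fuel = f + 1 := ⟨fuel - 1, by omega⟩
    rw [recA, buildB]
    rw [dif_neg (by omega)]
    -- fold over an arbitrary sublist l of steps, carrying the invariant
    have key : ∀ (l : List Int), (∀ s ∈ l, 0 < s) → ∀ (res : List (List Int)),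
        List.foldl (fun m step =>
          let nw := pre ++ [step]
          if nw.sum = n then m ++ [nw]
          else if nw.sum < n then recA f n steps nw m
          else m) (acc ++ res.map (fun c => pre ++ c)) l
        = acc ++ (List.foldl (fun r s =>
            if 0 < s ∧ s ≤ (t : Int) then
              r ++ (buildB steps (t - s.toNat)).map (fun c => s :: c)
            else r) res l).map (fun c => pre ++ c) := by
      intro l
      induction l with
      | nil => intro _ res; simp
      | cons s l ihl =>
        intro hl res
        have hs : 0 < s := hl s (by simp)
        simp only [List.foldl_cons]
        by_cases hsn : (pre ++ [s]).sum = n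
        · -- s = t: A appends the match; B appends map over buildB 0 = [[]]
          have hst : s = (t : Int) := by simp [List.sum_append] at hsn; omega
          have h1 : acc ++ res.map (fun c => pre ++ c) ++ [pre ++ [s]]
              = acc ++ (res ++ (buildB steps (t - s.toNat)).map (fun c => s :: c)).map
                  (fun c => pre ++ c) := by
            have : t - s.toNat = 0 := by omega
            simp [this, buildB]
          rw [if_pos hsn, h1, ihl (fun x hx => hl x (by simp [hx]))]
          rw [if_pos ⟨hs, le_of_eq hst⟩]
        · by_cases hlt : (pre ++ [s]).sum < n
          · -- s < t: A recurses, IH on t - s.toNat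
            have hslt : s < (t : Int) := by simp [List.sum_append] at hlt; omega
            have ht' : 1 ≤ t - s.toNat := by omega
            have hsum' : (pre ++ [s]).sum + ((t - s.toNat : Nat) : Int) = n := by
              simp [List.sum_append]
              omega
            have hf' : t - s.toNat ≤ f := by omega
            rw [if_neg hsn, if_pos hlt,
              ih (t - s.toNat) (by omega) f (pre ++ [s]) _ ht' hsum' hf']
            have hmap : (buildB steps (t - s.toNat)).map (fun c => (pre ++ [s]) ++ c)
                = ((buildB steps (t - s.toNat)).map (fun c => s :: c)).map
                    (fun c => pre ++ c) := by
              simp [List.map_map, Function.comp]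
            rw [hmap, List.append_assoc, ← List.map_append,
              ihl (fun x hx => hl x (by simp [hx]))]
            rw [if_pos ⟨hs, le_of_lt hslt⟩]
          · -- s > t: both sides skip
            have hsgt : ¬ s ≤ (t : Int) := by simp [List.sum_append] at hsn hlt; omega
            rw [if_neg hsn, if_neg hlt, ihl (fun x hx => hl x (by simp [hx]))]
            rw [if_neg (by tauto)]
    have := key steps hpos []
    simpa using this

-- With n ≤ 0 and all steps positive, A's top-level fold never fires a branch.
theorem recA_nonpos (n : Int) (hn : n ≤ 0) (steps : List Int)
    (hpos : ∀ s ∈ steps, 0 < s) (fuel : Nat) :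
    recA fuel n steps [] [] = [] := by
  match fuel with
  | 0 => rfl
  | f + 1 =>
    rw [recA]
    have : ∀ (l : List Int), (∀ s ∈ l, 0 < s) →
        List.foldl (fun m step =>
          let nw := ([] : List Int) ++ [step]
          if nw.sum = n then m ++ [nw]
          else if nw.sum < n then recA f n steps nw m
          else m) [] l = [] := by
      intro l
      induction l with
      | nil => intro _; rfl
      | cons s l ihl =>
        intro hl
        have hs : 0 < s := hl s (by simp)
        simp only [List.foldl_cons]
        rw [if_neg (by simp; omega), if_neg (by simp; omega)]
        exact ihl (fun x hx => hl x (by simp [hx]))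
    exact this steps hpos

-- ===== VERDICT (by name: the statement is the Claim_ definition above) =====
theorem staircase_steps_spec : Claim_equal_staircase_steps := by
  intro n steps _ hpre
  unfold Spec_staircase_steps staircase_steps staircase_steps_alt
  by_cases hn : n ≤ 0
  · rw [if_pos hn]
    exact recA_nonpos n hn steps hpre _
  · rw [if_neg hn]
    have h1 : 1 ≤ n.toNat := by omega
    have := recA_eq_buildB steps hpre n n.toNat (n.toNat + 1) [] [] h1
      (by simp; omega) (by omega)
    simpa using this
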